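-- pv_equiv track=rewrite | github.com/nishkalprakash/2024_03_CIPR_NP-Code | matcherfunc.py | combine_dataframes
-- ===== SOURCE A (Python) =====
-- def combine_dataframes(df1, df2):
--     length = len(df1)
--     length2 = len(df2)
--
--     flag0 = []
--
--     array = []
--
--     j, k = 0, 0
--     for i in range(len(df1)+len(df2)):
--         if j == len(df1):
--             array.append([1, df2[k][0], df2[k][1], df2[k][2], df2[k][3]])
--             k += 1
--         elif k == len(df2):
--             array.append([0, df1[j][0], df1[j][1], df1[j][2], df1[j][3]])
--             j += 1
--             flag0.append(i)
--         elif df1[j][0] < df2[k][0]: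
--             array.append([0, df1[j][0], df1[j][1], df1[j][2], df1[j][3]])
--             j += 1
--             flag0.append(i)
--         else:
--             array.append([1, df2[k][0], df2[k][1], df2[k][2], df2[k][3]])
--             k += 1
--
--     return array, flag0, length, length2
-- ===== SOURCE B (Python) =====
-- def combine_dataframes(df1, df2):
--     # Phase 1: cut points -- cuts[j] = how many df2 rows precede df1[j] in the output.
--     cuts = []
--     c = 0
--     for r in df1:
--         while c < len(df2) and df2[c][0] <= r[0]:
--             c += 1
--         cuts.append(c)
--     # Phase 2: flag0 by arithmetic -- df1[j] lands at global index j + cuts[j].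
--     flag0 = [j + c for j, c in enumerate(cuts)]
--     # Phase 3: assemble by slicing the tagged df2 between consecutive cut points.
--     tag1 = [[1, s[0], s[1], s[2], s[3]] for s in df2]
--     array = []
--     prev = 0
--     for r, c in zip(df1, cuts):
--         array.extend(tag1[prev:c])
--         array.append([0, r[0], r[1], r[2], r[3]])
--         prev = c
--     array.extend(tag1[prev:])
--     return array, flag0, len(df1), len(df2)
-- ===== Notes on version B (the rewrite author's own statement) =====
-- stated objective: alternative
-- what changed: Replaces A's single counted merge loop (dual cursors j/k over range(len1+len2), rows and flags appended inline) by a three-phase scheme: first compute cut points cuts[j] = number of df2 rows preceding df1[j], then obtain flag0 purely arithmetically as j + cuts[j], then assemble the output by slicing the pre-tagged df2 between consecutive cut points.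
import Mathlib
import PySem

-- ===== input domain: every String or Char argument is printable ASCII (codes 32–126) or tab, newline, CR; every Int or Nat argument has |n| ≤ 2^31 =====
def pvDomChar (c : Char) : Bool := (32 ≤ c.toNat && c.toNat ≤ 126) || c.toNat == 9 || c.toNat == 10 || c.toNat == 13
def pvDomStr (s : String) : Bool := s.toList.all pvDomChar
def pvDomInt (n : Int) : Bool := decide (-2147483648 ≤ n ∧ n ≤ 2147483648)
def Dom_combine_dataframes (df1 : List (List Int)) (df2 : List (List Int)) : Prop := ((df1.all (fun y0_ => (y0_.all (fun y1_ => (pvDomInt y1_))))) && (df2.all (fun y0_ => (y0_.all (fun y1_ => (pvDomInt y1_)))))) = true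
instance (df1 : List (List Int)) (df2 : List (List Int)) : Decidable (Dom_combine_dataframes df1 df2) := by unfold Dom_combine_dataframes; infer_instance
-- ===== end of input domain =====

-- B replaces A's single interleaved merge loop by a three-phase scheme: cut points
-- (how many df2 rows precede each df1 row), arithmetic flag0 = j + cuts[j], and
-- assembly by slicing the tagged df2 between consecutive cut points.

-- ===== PORT A =====
-- the body of A's for-loop, one iteration (i is the loop counter);
-- element accesses use getD: the loop logic keeps j/k in range, and rows shorter
-- than 4 (where Python raises IndexError) are excluded by Pre_combine_dataframes
def stepA (df1 : List (List Int)) (df2 : List (List Int))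
    (st : List (List Int) × List Int × Nat × Nat) (i : Nat) :
    List (List Int) × List Int × Nat × Nat :=
  let array := st.1; let flag0 := st.2.1; let j := st.2.2.1; let k := st.2.2.2
  if j = df1.length then
    let r := df2.getD k []
    (array ++ [[1, r.getD 0 0, r.getD 1 0, r.getD 2 0, r.getD 3 0]], flag0, j, k + 1)
  else if k = df2.length then
    let r := df1.getD j []
    (array ++ [[0, r.getD 0 0, r.getD 1 0, r.getD 2 0, r.getD 3 0]], flag0 ++ [(i : Int)], j + 1, k)
  else if (df1.getD j []).getD 0 0 < (df2.getD k []).getD 0 0 then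
    let r := df1.getD j []
    (array ++ [[0, r.getD 0 0, r.getD 1 0, r.getD 2 0, r.getD 3 0]], flag0 ++ [(i : Int)], j + 1, k)
  else
    let r := df2.getD k []
    (array ++ [[1, r.getD 0 0, r.getD 1 0, r.getD 2 0, r.getD 3 0]], flag0, j, k + 1)

def combine_dataframes (df1 : List (List Int)) (df2 : List (List Int)) : List (List Int) × List Int × Int × Int :=
  let length : Int := df1.length
  let length2 : Int := df2.length
  let s := (List.range (df1.length + df2.length)).foldl (stepA df1 df2) ([], [], 0, 0)
  (s.1, s.2.1, length, length2)

-- ===== PORT B =====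
-- a tagged row [t, r[0], r[1], r[2], r[3]] (getD totalizes; short rows are outside Pre_)
def tagRow (t : Int) (r : List Int) : List Int :=
  [t, r.getD 0 0, r.getD 1 0, r.getD 2 0, r.getD 3 0]

-- the while loop 'while c < len(df2) and df2[c][0] <= v: c += 1' advances through the
-- suffix df2[c:]; on that dropped suffix it counts the leading rows with first entry ≤ v
def advB : List (List Int) → Int → Nat
  | [], _ => 0
  | x :: t, v => if x.getD 0 0 ≤ v then advB t v + 1 else 0

-- one iteration of B's first for-loop: state (c, cuts)
def stepCut (df2 : List (List Int)) (st : Nat × List Nat) (r : List Int) : Nat × List Nat :=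
  let c := st.1 + advB (df2.drop st.1) (r.getD 0 0)
  (c, st.2 ++ [c])

-- one iteration of B's assembly loop: state (array, prev); tag1[prev:c] is
-- (tag1.drop prev).take (c - prev), exact since 0 ≤ prev ≤ c here
def stepAsm (tag1 : List (List Int)) (st : List (List Int) × Nat) (p : List Int × Nat) :
    List (List Int) × Nat :=
  (st.1 ++ (tag1.drop st.2).take (p.2 - st.2) ++ [tagRow 0 p.1], p.2)

def combine_dataframes_alt (df1 : List (List Int)) (df2 : List (List Int)) : List (List Int) × List Int × Int × Int :=
  let cuts := (df1.foldl (stepCut df2) (0, [])).2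
  let flag0 := (PySem.List.enumerate cuts 0).map (fun p => p.1 + (p.2 : Int))
  let tag1 := df2.map (tagRow 1)
  let s := (df1.zip cuts).foldl (stepAsm tag1) ([], 0)
  (s.1 ++ tag1.drop s.2, flag0, (df1.length : Int), (df2.length : Int))

-- ===== PRECONDITION & SPEC =====
-- Pre_ excludes exactly the inputs on which Python A raises IndexError: a row with
-- fewer than 4 entries (every row is eventually indexed at 0..3).
def Pre_combine_dataframes (df1 : List (List Int)) (df2 : List (List Int)) : Prop :=
  (∀ r ∈ df1, 4 ≤ r.length) ∧ (∀ r ∈ df2, 4 ≤ r.length)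
instance (df1 : List (List Int)) (df2 : List (List Int)) : Decidable (Pre_combine_dataframes df1 df2) := by unfold Pre_combine_dataframes; infer_instance

def pvWitness_combine_dataframes : List (List Int) × List (List Int) :=
  ([[1, 2, 3, 4], [3, 0, 0, 0]], [[0, 5, 6, 7], [3, 9, 9, 9]])

def Spec_combine_dataframes (df1 : List (List Int)) (df2 : List (List Int)) (out : List (List Int) × List Int × Int × Int) : Prop := out = combine_dataframes_alt df1 df2
instance (df1 : List (List Int)) (df2 : List (List Int)) (out : List (List Int) × List Int × Int × Int) : Decidable (Spec_combine_dataframes df1 df2 out) := by unfold Spec_combine_dataframes; infer_instance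

-- ===== CLAIM (what is proved, stated in full; the proofs are below) =====
def Claim_equal_combine_dataframes : Prop := ∀ (df1 : List (List Int)) (df2 : List (List Int)), Dom_combine_dataframes df1 df2 → Pre_combine_dataframes df1 df2 → Spec_combine_dataframes df1 df2 (combine_dataframes df1 df2)

-- ===== LEMMAS AND PROOFS =====

-- the merge A's loop computes, in recursive form (take df1 only when strictly less)
def mergeTag : List (List Int) → List (List Int) → List (List Int)
  | [], b => b.map (tagRow 1)
  | x :: a, [] => (x :: a).map (tagRow 0)
  | x :: a, y :: b =>
    if x.getD 0 0 < y.getD 0 0 then tagRow 0 x :: mergeTag a (y :: b)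
    else tagRow 1 y :: mergeTag (x :: a) b

-- positions (from index i) of tag-0 rows in a merged list
def flagsAux : Int → List (List Int) → List Int
  | _, [] => []
  | i, r :: rs => if r.getD 0 0 = 0 then i :: flagsAux (i + 1) rs else flagsAux (i + 1) rs

lemma get?_of_drop (l : List (List Int)) (j : Nat) (x : List Int) (t : List (List Int))
    (h : l.drop j = x :: t) : l[j]? = some x := by
  rw [← List.head?_drop, h]; rfl

lemma drop_succ_of_drop (l : List (List Int)) (j : Nat) (x : List Int) (t : List (List Int))
    (h : l.drop j = x :: t) : l.drop (j + 1) = t := by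
  rw [← List.drop_drop, h]; rfl

lemma cast_succ_nat (m : Nat) : ((m + 1 : Nat) : Int) = ((m : Nat) : Int) + 1 := by
  push_cast; ring

lemma loopA (df1 df2 : List (List Int)) :
    ∀ (n : Nat) (a b : List (List Int)) (j k : Nat)
      (array : List (List Int)) (flag0 : List Int),
      a.length + b.length = n →
      df1.drop j = a → df2.drop k = b →
      j + a.length = df1.length → k + b.length = df2.length →
      (List.range' (j + k) n).foldl (stepA df1 df2) (array, flag0, j, k)
        = (array ++ mergeTag a b, flag0 ++ flagsAux ((j + k : Nat) : Int) (mergeTag a b),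
           df1.length, df2.length) := by
  intro n
  induction n with
  | zero =>
    intro a b j k array flag0 hn ha hb hj hk
    have ha0 : a = [] := List.eq_nil_of_length_eq_zero (by omega)
    have hb0 : b = [] := List.eq_nil_of_length_eq_zero (by omega)
    subst ha0; subst hb0
    simp [mergeTag, flagsAux]
    constructor <;> simp at hj hk <;> omega
  | succ n ih =>
    intro a b j k array flag0 hn ha hb hj hk
    rw [List.range'_succ, List.foldl_cons]
    match a, b with
    | [], [] => simp at hn
    | [], y :: b' =>
      have hjlen : j = df1.length := by simp at hj; omega
      have hy : df2[k]? = some y := get?_of_drop df2 k y b' hb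
      have hstep : stepA df1 df2 (array, flag0, j, k) (j + k)
          = (array ++ [tagRow 1 y], flag0, j, k + 1) := by
        simp [stepA, hjlen, hy, tagRow]
      rw [hstep]
      have hrec := ih [] b' j (k + 1) (array ++ [tagRow 1 y]) flag0
        (by simp at hn ⊢; omega) ha (drop_succ_of_drop df2 k y b' hb) hj
        (by simp at hk ⊢; omega)
      rw [show j + (k + 1) = j + k + 1 by omega] at hrec
      rw [hrec, cast_succ_nat]
      simp [mergeTag, flagsAux, tagRow]
    | x :: a', [] =>
      have hjne : j ≠ df1.length := by simp at hj; omega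
      have hklen : k = df2.length := by simp at hk; omega
      have hx : df1[j]? = some x := get?_of_drop df1 j x a' ha
      have hstep : stepA df1 df2 (array, flag0, j, k) (j + k)
          = (array ++ [tagRow 0 x], flag0 ++ [((j + k : Nat) : Int)], j + 1, k) := by
        simp [stepA, hjne, hklen, hx, tagRow]
      rw [hstep]
      have hrec := ih a' [] (j + 1) k (array ++ [tagRow 0 x]) (flag0 ++ [((j + k : Nat) : Int)])
        (by simp at hn ⊢; omega) (drop_succ_of_drop df1 j x a' ha) hb
        (by simp at hj ⊢; omega) hk
      rw [show j + 1 + k = j + k + 1 by omega] at hrec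
      rw [hrec, cast_succ_nat]
      have hm : mergeTag (x :: a') [] = tagRow 0 x :: mergeTag a' [] := by
        cases a' <;> simp [mergeTag]
      rw [hm]
      simp [flagsAux, tagRow]
    | x :: a', y :: b' =>
      have hjne : j ≠ df1.length := by simp at hj; omega
      have hkne : k ≠ df2.length := by simp at hk; omega
      have hx : df1[j]? = some x := get?_of_drop df1 j x a' ha
      have hy : df2[k]? = some y := get?_of_drop df2 k y b' hb
      by_cases hcmp : x.getD 0 0 < y.getD 0 0
      · have hstep : stepA df1 df2 (array, flag0, j, k) (j + k)
            = (array ++ [tagRow 0 x], flag0 ++ [((j + k : Nat) : Int)], j + 1, k) := by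
          simp only [stepA, List.getD_eq_getElem?_getD] at hcmp ⊢
          simp [hjne, hkne, hx, hy, hcmp, tagRow, List.getD_eq_getElem?_getD]
        rw [hstep]
        have hrec := ih a' (y :: b') (j + 1) k (array ++ [tagRow 0 x]) (flag0 ++ [((j + k : Nat) : Int)])
          (by simp at hn ⊢; omega) (drop_succ_of_drop df1 j x a' ha) hb
          (by simp at hj ⊢; omega) hk
        rw [show j + 1 + k = j + k + 1 by omega] at hrec
        rw [hrec, cast_succ_nat]
        have hm : mergeTag (x :: a') (y :: b') = tagRow 0 x :: mergeTag a' (y :: b') := by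
          simp only [mergeTag]; rw [if_pos hcmp]
        rw [hm]
        simp [flagsAux, tagRow]
      · have hstep : stepA df1 df2 (array, flag0, j, k) (j + k)
            = (array ++ [tagRow 1 y], flag0, j, k + 1) := by
          simp only [stepA, List.getD_eq_getElem?_getD] at hcmp ⊢
          simp [hjne, hkne, hx, hy, hcmp, tagRow, List.getD_eq_getElem?_getD]
        rw [hstep]
        have hrec := ih (x :: a') b' j (k + 1) (array ++ [tagRow 1 y]) flag0
          (by simp at hn ⊢; omega) ha (drop_succ_of_drop df2 k y b' hb) hj
          (by simp at hk ⊢; omega)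
        rw [show j + (k + 1) = j + k + 1 by omega] at hrec
        rw [hrec, cast_succ_nat]
        have hm : mergeTag (x :: a') (y :: b') = tagRow 1 y :: mergeTag (x :: a') b' := by
          simp only [mergeTag]; rw [if_neg hcmp]
        rw [hm]
        simp [flagsAux, tagRow]

-- recursive characterization of B's cut-point loop: (final c, list of cuts)
def cutsSpec (df2 : List (List Int)) : Nat → List (List Int) → Nat × List Nat
  | c0, [] => (c0, [])
  | c0, r :: t =>
    let c := c0 + advB (df2.drop c0) (r.getD 0 0)
    let s := cutsSpec df2 c t
    (s.1, c :: s.2)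

lemma cuts_fold (df2 : List (List Int)) : ∀ (df1 : List (List Int)) (c0 : Nat) (acc : List Nat),
    df1.foldl (stepCut df2) (c0, acc) = ((cutsSpec df2 c0 df1).1, acc ++ (cutsSpec df2 c0 df1).2) := by
  intro df1
  induction df1 with
  | nil => intro c0 acc; simp [cutsSpec]
  | cons r t ih => intro c0 acc; simp [cutsSpec, stepCut, ih]

lemma mergeTag_nil_right (a : List (List Int)) : mergeTag a [] = a.map (tagRow 0) := by
  cases a <;> simp [mergeTag]

lemma advB_le_length : ∀ (b : List (List Int)) (v : Int), advB b v ≤ b.length := by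
  intro b v
  induction b with
  | nil => simp [advB]
  | cons y b' ih =>
    simp only [advB, List.length_cons]
    split <;> omega

-- the merge consumes exactly advB b x₀ rows of b before emitting x
lemma mergeTag_cons (x : List Int) (a : List (List Int)) : ∀ (b : List (List Int)),
    mergeTag (x :: a) b
      = (b.take (advB b (x.getD 0 0))).map (tagRow 1)
        ++ tagRow 0 x :: mergeTag a (b.drop (advB b (x.getD 0 0))) := by
  intro b
  induction b with
  | nil => simp [advB, mergeTag_nil_right]
  | cons y b' ih =>
    by_cases h : y.getD 0 0 ≤ x.getD 0 0
    · have hlt : ¬ x.getD 0 0 < y.getD 0 0 := not_lt.mpr h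
      simp only [mergeTag, if_neg hlt, advB, if_pos h, List.take_succ_cons,
        List.drop_succ_cons, List.map_cons, List.cons_append]
      rw [ih]
    · have hlt : x.getD 0 0 < y.getD 0 0 := lt_of_not_ge h
      simp only [mergeTag, if_pos hlt, advB, if_neg h, List.take_zero, List.drop_zero,
        List.map_nil, List.nil_append]

-- B's assembly loop, run against the cuts of cutsSpec, rebuilds A's merge
lemma asm_master (df2 : List (List Int)) : ∀ (df1 : List (List Int)) (c0 : Nat) (acc : List (List Int)),
    ((df1.zip (cutsSpec df2 c0 df1).2).foldl (stepAsm (df2.map (tagRow 1))) (acc, c0)).2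
        = (cutsSpec df2 c0 df1).1
    ∧ ((df1.zip (cutsSpec df2 c0 df1).2).foldl (stepAsm (df2.map (tagRow 1))) (acc, c0)).1
        ++ (df2.map (tagRow 1)).drop (cutsSpec df2 c0 df1).1
      = acc ++ mergeTag df1 (df2.drop c0) := by
  intro df1
  induction df1 with
  | nil =>
    intro c0 acc
    refine ⟨rfl, ?_⟩
    simp [cutsSpec, mergeTag, List.map_drop]
  | cons x a ih =>
    intro c0 acc
    simp only [cutsSpec, List.zip_cons_cons, List.foldl_cons]
    have hstep : stepAsm (df2.map (tagRow 1)) (acc, c0)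
        (x, c0 + advB (df2.drop c0) (x.getD 0 0))
        = (acc ++ ((df2.drop c0).take (advB (df2.drop c0) (x.getD 0 0))).map (tagRow 1)
            ++ [tagRow 0 x], c0 + advB (df2.drop c0) (x.getD 0 0)) := by
      simp only [stepAsm, Nat.add_sub_cancel_left, ← List.map_drop, ← List.map_take,
        List.take_drop]
    rw [hstep]
    obtain ⟨h1, h2⟩ := ih (c0 + advB (df2.drop c0) (x.getD 0 0))
      (acc ++ ((df2.drop c0).take (advB (df2.drop c0) (x.getD 0 0))).map (tagRow 1) ++ [tagRow 0 x])
    refine ⟨h1, ?_⟩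
    rw [h2, mergeTag_cons, List.drop_drop]
    simp [List.append_assoc]

lemma flagsAux_map_tag1 : ∀ (l : List (List Int)) (s : Int),
    flagsAux s (l.map (tagRow 1)) = [] := by
  intro l
  induction l with
  | nil => intro s; simp [flagsAux]
  | cons r t ih => intro s; simp [flagsAux, tagRow, ih]

lemma flagsAux_append_tag1 : ∀ (l : List (List Int)) (s : Int) (rest : List (List Int)),
    flagsAux s (l.map (tagRow 1) ++ rest) = flagsAux (s + (l.length : Int)) rest := by
  intro l
  induction l with
  | nil => intro s rest; simp
  | cons r t ih =>
    intro s rest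
    simp only [List.map_cons, List.cons_append, flagsAux, tagRow]
    rw [if_neg (by norm_num), ih]
    congr 1
    simp only [List.length_cons]
    push_cast
    ring

-- the flag positions of A's merge are exactly j + cuts[j]
lemma flags_master (df2 : List (List Int)) : ∀ (df1 : List (List Int)) (c0 : Nat) (j0 : Int),
    flagsAux (j0 + (c0 : Int)) (mergeTag df1 (df2.drop c0))
      = (PySem.List.enumerate (cutsSpec df2 c0 df1).2 j0).map (fun p => p.1 + (p.2 : Int)) := by
  intro df1
  induction df1 with
  | nil =>
    intro c0 j0
    simp only [cutsSpec, mergeTag, PySem.List.enumerate_nil, List.map_nil]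
    exact flagsAux_map_tag1 _ _
  | cons x a ih =>
    intro c0 j0
    rw [mergeTag_cons, flagsAux_append_tag1]
    have hlen : (((df2.drop c0).take (advB (df2.drop c0) (x.getD 0 0))).length : Int)
        = (advB (df2.drop c0) (x.getD 0 0) : Int) := by
      rw [List.length_take, Nat.min_eq_left (advB_le_length _ _)]
    rw [hlen]
    simp only [cutsSpec, flagsAux, tagRow, List.getD_cons_zero, if_true]
    rw [PySem.List.enumerate_cons, List.map_cons, List.drop_drop]
    have hidx : j0 + (c0 : Int) + (advB (df2.drop c0) (x.getD 0 0) : Int)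
        = j0 + ((c0 + advB (df2.drop c0) (x.getD 0 0) : Nat) : Int) := by push_cast; ring
    have hidx1 : j0 + (c0 : Int) + (advB (df2.drop c0) (x.getD 0 0) : Int) + 1
        = (j0 + 1) + ((c0 + advB (df2.drop c0) (x.getD 0 0) : Nat) : Int) := by push_cast; ring
    rw [hidx1]
    rw [ih (c0 + advB (df2.drop c0) (x.getD 0 0)) (j0 + 1)]
    rw [hidx]

-- ===== VERDICT (by name: the statement is the Claim_ definition above) =====
theorem combine_dataframes_spec : Claim_equal_combine_dataframes := by
  intro df1 df2 _hdom _hpre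
  unfold Spec_combine_dataframes combine_dataframes combine_dataframes_alt
  have h := loopA df1 df2 (df1.length + df2.length) df1 df2 0 0 [] []
    rfl rfl rfl (by simp) (by simp)
  simp only [Nat.add_zero] at h
  rw [List.range_eq_range', h]
  simp only [List.nil_append, Nat.cast_zero]
  rw [cuts_fold df2 df1 0 []]
  simp only [List.nil_append]
  obtain ⟨h1, h2⟩ := asm_master df2 df1 0 []
  have hflags := flags_master df2 df1 0 0
  simp only [Nat.cast_zero, add_zero, List.drop_zero] at h2 hflags
  refine Prod.ext ?_ (Prod.ext ?_ rfl)
  · rw [h1]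
    symm
    simpa using h2
  · simpa using hflags
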